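-- pv_equiv track=rewrite | github.com/KimonSenpai/Materials-Kirill-2023 | 5-sdamgia-8094.py | f
-- ===== SOURCE A (Python) =====
-- def f(val):
--   copy_val = val
--   sum_dig = 0
--   while copy_val > 0:
--     sum_dig += copy_val % 2
--     copy_val //= 2
--
--   val = val*2 + sum_dig%2
--   val *= 2
--   return val
-- ===== SOURCE B (Python) =====
-- def f(val):
--     parity = 0
--     copy = val
--     while copy > 0:
--         copy &= copy - 1
--         parity = 1 - parity
--     return (val * 2 + parity) * 2
-- ===== Notes on version B (the rewrite author's own statement) =====
-- stated objective: alternative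
-- what changed: A sums every binary digit of val with %2 and //2 per iteration; B computes the same popcount parity with Brian Kernighan's set-bit loop (copy &= copy-1, toggling parity once per 1-bit) and returns (val*2+parity)*2.
import Mathlib
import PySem

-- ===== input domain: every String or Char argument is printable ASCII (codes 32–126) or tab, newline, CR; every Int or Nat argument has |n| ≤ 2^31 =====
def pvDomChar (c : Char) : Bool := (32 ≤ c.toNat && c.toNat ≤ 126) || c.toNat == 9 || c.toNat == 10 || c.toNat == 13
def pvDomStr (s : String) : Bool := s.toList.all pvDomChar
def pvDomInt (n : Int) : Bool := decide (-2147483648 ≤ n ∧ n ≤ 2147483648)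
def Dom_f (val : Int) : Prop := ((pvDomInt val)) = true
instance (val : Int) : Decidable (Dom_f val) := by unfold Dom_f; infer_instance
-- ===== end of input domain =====

-- B replaces A's scan of every binary digit (%2 and //2 per step) by Brian Kernighan's
-- set-bit loop (copy &= copy-1 once per 1-bit) to obtain the same popcount parity
-- (objective: alternative).

-- ===== PORT A =====
-- while copy_val > 0: sum_dig += copy_val % 2; copy_val //= 2
def fSum (copy_val sum_dig : Int) : Int :=
  if copy_val > 0 then
    fSum (PySem.Int.floordiv copy_val 2) (sum_dig + PySem.Int.mod copy_val 2)
  else sum_dig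
termination_by copy_val.toNat
decreasing_by
  rw [PySem.Int.floordiv_eq_ediv_of_pos (by omega)]; omega

def f (val : Int) : Int :=
  let sum_dig := fSum val 0
  let val₁ := val * 2 + PySem.Int.mod sum_dig 2
  let val₂ := val₁ * 2
  val₂

-- ===== PORT B =====
-- while copy > 0: copy &= copy - 1; parity = 1 - parity
def fKer (copy parity : Int) : Int :=
  if copy > 0 then
    fKer (PySem.Int.band copy (copy - 1)) (1 - parity)
  else parity
termination_by copy.toNat
decreasing_by
  rw [PySem.Int.band_of_nonneg (by omega) (by omega)]
  have := Nat.and_le_right (n := copy.toNat) (m := (copy - 1).toNat)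
  omega

def f_alt (val : Int) : Int :=
  (val * 2 + fKer val 0) * 2

-- ===== PRECONDITION & SPEC =====
def Spec_f (val : Int) (out : Int) : Prop := out = f_alt val
instance (val : Int) (out : Int) : Decidable (Spec_f val out) := by unfold Spec_f; infer_instance

-- ===== CLAIM (what is proved, stated in full; the proofs are below) =====
def Claim_equal_f : Prop := ∀ (val : Int), Dom_f val → Spec_f val (f val)

-- ===== LEMMAS AND PROOFS =====

-- bitwise & on one binary digit at a time
theorem land_bits (a b x y : Nat) (hx : x < 2) (hy : y < 2) :
    (2*a+x) &&& (2*b+y) = 2*(a &&& b) + (x &&& y) := by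
  apply Nat.eq_of_testBit_eq
  intro i
  have hxy : x &&& y < 2 := by interval_cases x <;> interval_cases y <;> decide
  cases i with
  | zero =>
    interval_cases x <;> interval_cases y <;> simp [Nat.testBit_zero]
  | succ j =>
    rw [Nat.testBit_land, Nat.testBit_succ, Nat.testBit_succ, Nat.testBit_succ]
    have h1 : (2*a+x)/2 = a := by omega
    have h2 : (2*b+y)/2 = b := by omega
    have h3 : (2*(a &&& b) + (x &&& y))/2 = a &&& b := by omega
    rw [h1, h2, h3, Nat.testBit_land]

theorem bitCount_two_mul (j : Nat) :
    PySem.Int.bitCount ((2*j : Nat) : Int) = PySem.Int.bitCount (j : Int) := by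
  rcases Nat.eq_zero_or_pos j with h | h
  · subst h; simp
  · rw [PySem.Int.bitCount_natCast (m := 2*j) (by omega)]
    have h1 : 2*j % 2 = 0 := by omega
    have h2 : 2*j/2 = j := by omega
    rw [h1, h2]
    omega

theorem bitCount_two_mul_add_one (j : Nat) :
    PySem.Int.bitCount ((2*j+1 : Nat) : Int) = 1 + PySem.Int.bitCount (j : Int) := by
  rw [PySem.Int.bitCount_natCast (m := 2*j+1) (by omega)]
  have h1 : (2*j+1) % 2 = 1 := by omega
  have h2 : (2*j+1)/2 = j := by omega
  rw [h1, h2]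

-- Kernighan's step kills exactly one set bit
theorem kernighan_step (m : Nat) (hm : 0 < m) :
    PySem.Int.bitCount ((m &&& (m-1) : Nat) : Int) + 1 = PySem.Int.bitCount (m : Int) := by
  induction m using Nat.strong_induction_on with
  | _ m ih =>
    rcases Nat.even_or_odd m with ⟨k, hk⟩ | ⟨k, hk⟩
    · -- m = 2k, k > 0
      have hk' : 0 < k := by omega
      have hsplit : m &&& (m-1) = 2*(k &&& (k-1)) := by
        have h := land_bits k (k-1) 0 1 (by omega) (by omega)
        have e1 : 2*k+0 = m := by omega
        have e2 : 2*(k-1)+1 = m-1 := by omega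
        rw [e1, e2] at h
        simpa using h
      rw [hsplit, bitCount_two_mul]
      have hm2k : m = 2*k := by omega
      rw [hm2k, bitCount_two_mul]
      exact ih k (by omega) hk'
    · -- m = 2k+1 : m &&& (m-1) = 2k
      have hsplit : m &&& (m-1) = 2*k := by
        have h := land_bits k k 1 0 (by omega) (by omega)
        have e1 : 2*k+1 = m := by omega
        have e2 : 2*k+0 = m-1 := by omega
        rw [e1, e2] at h
        simpa [Nat.and_self] using h
      rw [hsplit, bitCount_two_mul]
      have hm2k : m = 2*k+1 := by omega
      rw [hm2k, bitCount_two_mul_add_one]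
      omega

-- A's loop accumulates the bit count
theorem fSum_eq_bitCount (M : Nat) : ∀ (n : Int), 0 ≤ n → n.toNat = M →
    ∀ acc : Int, fSum n acc = acc + (PySem.Int.bitCount n : Int) := by
  induction M using Nat.strong_induction_on with
  | _ M ih =>
  intro n hn hM acc
  rw [fSum]
  split
  · next hpos =>
    have hfd : PySem.Int.floordiv n 2 = n / 2 := PySem.Int.floordiv_eq_ediv_of_pos (by omega)
    have hrec := ih (n/2).toNat (by omega) (n/2) (by omega) rfl (acc + PySem.Int.mod n 2)
    rw [hfd, hrec]
    rw [PySem.Int.bitCount_of_pos (n := n) hpos, hfd]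
    have hmn : 0 ≤ PySem.Int.mod n 2 := PySem.Int.mod_nonneg _ (by omega)
    have hcast : ((PySem.Int.mod n 2).toNat : Int) = PySem.Int.mod n 2 := by omega
    push_cast
    omega
  · next hneg =>
    have h0 : n = 0 := by omega
    subst h0
    simp

-- B's loop computes the parity of the bit count
theorem fKer_eq_parity (M : Nat) : ∀ (n : Int), 0 ≤ n → n.toNat = M →
    ∀ p : Int, fKer n p = if PySem.Int.bitCount n % 2 = 0 then p else 1 - p := by
  induction M using Nat.strong_induction_on with
  | _ M ih =>
  intro n hn hM p
  rw [fKer]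
  split
  · next hpos =>
    have hsub : (n-1).toNat = n.toNat - 1 := by omega
    have hb : PySem.Int.band n (n-1) = ((n.toNat &&& (n.toNat - 1) : Nat) : Int) := by
      rw [PySem.Int.band_of_nonneg (by omega) (by omega), hsub]
    have hlt : (n.toNat &&& (n.toNat - 1)) < n.toNat := by
      have := Nat.and_le_right (n := n.toNat) (m := n.toNat - 1)
      omega
    have hrec := ih (PySem.Int.band n (n-1)).toNat
      (by rw [hb, Int.toNat_natCast]; omega)
      (PySem.Int.band n (n-1)) (by rw [hb]; exact_mod_cast Int.natCast_nonneg _) rfl (1 - p)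
    rw [hb] at hrec
    rw [hb, hrec]
    have hstep := kernighan_step n.toNat (by omega)
    have hcast : ((n.toNat : Nat) : Int) = n := by omega
    rw [hcast] at hstep
    split_ifs <;> omega
  · next hneg =>
    have h0 : n = 0 := by omega
    subst h0
    simp

-- the two loops agree on what f consumes
theorem loops_agree (val : Int) :
    PySem.Int.mod (fSum val 0) 2 = fKer val 0 := by
  by_cases h : val ≤ 0
  · rw [fSum, fKer, if_neg (by omega), if_neg (by omega)]
    decide
  · rw [fSum_eq_bitCount val.toNat val (by omega) rfl 0,
        fKer_eq_parity val.toNat val (by omega) rfl 0]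
    have hc : (0 : Int) + (PySem.Int.bitCount val : Int) = ((PySem.Int.bitCount val : Nat) : Int) := by omega
    have hm : PySem.Int.mod (↑(PySem.Int.bitCount val) : Int) 2 = ↑(PySem.Int.bitCount val % 2) := by
      exact_mod_cast PySem.Int.mod_natCast (PySem.Int.bitCount val) 2
    rw [hc, hm]
    split_ifs <;> omega

-- ===== VERDICT (by name: the statement is the Claim_ definition above) =====
theorem f_spec : Claim_equal_f := by
  intro val _
  unfold Spec_f
  simp only [f, f_alt]
  rw [loops_agree val]
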